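-- pv_equiv track=rewrite | github.com/lutk3029/GLOutlier | data_partition.py | get_tid_belong
-- ===== SOURCE A (Python) =====
-- def get_tid_belong(ii,data):#获得该属性出现的区间集合
--     l = r = -1
--     n = len(data)
--     res = []
--     flag = 0
--     for i in range(n):
--         temp = data[i].split(' ')
--         if (str(ii) in temp):
--             if (flag):
--                 r = i
--             else:
--                 l = r = i
--             flag = 1
--         else:
--             if (flag):
--                 res.append([l,r])
--                 flag = 0
--     return res
-- ===== SOURCE B (Python) =====
-- def get_tid_belong(ii, data):
--     # Alternative decomposition: jump from run to run with an inner scan that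
--     # finds each maximal block of matching lines; a block that is never closed
--     # by a non-matching line (i.e. reaches the last line) yields no interval.
--     key = str(ii)
--     n = len(data)
--     res = []
--     i = 0
--     while i < n:
--         if key in data[i].split(' '):
--             j = i
--             while j + 1 < n and key in data[j + 1].split(' '):
--                 j += 1
--             if j + 1 < n:  # run closed by a non-matching line
--                 res.append([i, j])
--             i = j + 1
--         else:
--             i += 1
--     return res
-- ===== Notes on version B (the rewrite author's own statement) =====
-- stated objective: alternative
-- what changed: A is a one-pass flag/l/r state machine; B instead jumps run to run, using an inner scan to find the end of each maximal block of matching lines and emitting an interval only when the block is closed by a later non-matching line.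
import Mathlib
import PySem

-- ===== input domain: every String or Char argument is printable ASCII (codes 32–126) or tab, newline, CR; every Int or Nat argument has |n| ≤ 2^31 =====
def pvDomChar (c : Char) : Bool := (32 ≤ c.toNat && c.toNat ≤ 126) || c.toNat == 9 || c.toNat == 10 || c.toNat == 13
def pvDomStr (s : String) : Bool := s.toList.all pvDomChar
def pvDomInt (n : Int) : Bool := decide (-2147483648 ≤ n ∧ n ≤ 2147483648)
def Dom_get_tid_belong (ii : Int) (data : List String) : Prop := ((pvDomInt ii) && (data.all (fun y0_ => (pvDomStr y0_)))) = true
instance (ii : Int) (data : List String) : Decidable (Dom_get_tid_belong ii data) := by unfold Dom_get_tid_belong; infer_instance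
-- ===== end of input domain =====

-- B finds each maximal run of matching lines with an inner forward scan and jumps past it,
-- instead of A's one-pass l/r/flag state machine; same cost, different decomposition.
-- ===== PORT A =====
def get_tid_belong (ii : Int) (data : List String) : List (List Int) :=
  let st := (PySem.List.pyRange 0 (data.length : Int) 1).foldl
    (fun (st : Int × Int × Int × List (List Int)) (i : Int) =>
      let temp := (PySem.Str.split? (PySem.List.pyGetD data i "") " ").getD []  -- sep " " ≠ "": always some
      if PySem.Int.toStr ii ∈ temp then
        if st.2.2.1 ≠ 0 then (st.1, i, 1, st.2.2.2)
        else (i, i, 1, st.2.2.2)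
      else
        if st.2.2.1 ≠ 0 then (st.1, st.2.1, 0, st.2.2.2 ++ [[st.1, st.2.1]])
        else st)
    (-1, -1, 0, ([] : List (List Int)))
  st.2.2.2


-- ===== PORT B =====
-- B-side helpers
def pvMatch (key line : String) : Bool := decide (key ∈ (PySem.Str.split? line " ").getD [])

-- inner scan of B: consume the rest of a run; returns (last matched index, remaining lines)
def pvConsume (key : String) : List String → Int → Int × List String
  | [], j => (j, [])
  | line :: rest, j =>
    if pvMatch key line then pvConsume key rest (j + 1) else (j, line :: rest)

-- needed by pvRuns's termination proof
theorem pvConsume_length_le (key : String) : ∀ (xs : List String) (j : Int),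
    (pvConsume key xs j).2.length ≤ xs.length := by
  intro xs
  induction xs with
  | nil => intro j; simp [pvConsume]
  | cons line rest ih =>
    intro j
    simp only [pvConsume]
    split
    · exact Nat.le_trans (ih (j + 1)) (Nat.le_succ _)
    · simp

def pvRuns (key : String) : List String → Int → List (List Int)
  | [], _ => []
  | line :: rest, i =>
    if pvMatch key line then
      let p := pvConsume key rest i
      if p.2.isEmpty then [] else [i, p.1] :: pvRuns key p.2 (p.1 + 1)
    else pvRuns key rest (i + 1)
  termination_by xs _ => xs.length
  decreasing_by
  · exact Nat.lt_succ_of_le (pvConsume_length_le key rest i)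
  · exact Nat.lt_succ_self _

def get_tid_belong_alt (ii : Int) (data : List String) : List (List Int) :=
  pvRuns (PySem.Int.toStr ii) data 0


-- ===== PRECONDITION & SPEC =====
def Spec_get_tid_belong (ii : Int) (data : List String) (out : List (List Int)) : Prop := out = get_tid_belong_alt ii data
instance (ii : Int) (data : List String) (out : List (List Int)) : Decidable (Spec_get_tid_belong ii data out) := by unfold Spec_get_tid_belong; infer_instance

-- ===== CLAIM (what is proved, stated in full; the proofs are below) =====
def Claim_equal_get_tid_belong : Prop := ∀ (ii : Int) (data : List String), Dom_get_tid_belong ii data → Spec_get_tid_belong ii data (get_tid_belong ii data)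

-- ===== LEMMAS AND PROOFS =====


-- A's loop body, over (index, line) pairs
def pvStepA (key : String) (st : Int × Int × Int × List (List Int)) (pr : Int × String) :
    Int × Int × Int × List (List Int) :=
  if key ∈ (PySem.Str.split? pr.2 " ").getD [] then
    if st.2.2.1 ≠ 0 then (st.1, pr.1, 1, st.2.2.2)
    else (pr.1, pr.1, 1, st.2.2.2)
  else
    if st.2.2.1 ≠ 0 then (st.1, st.2.1, 0, st.2.2.2 ++ [[st.1, st.2.1]])
    else st

-- the value B produces while a run that started at l is still open, last match at r
def pvTail (key : String) (l : Int) (xs : List String) (r : Int) : List (List Int) :=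
  let p := pvConsume key xs r
  if p.2.isEmpty then [] else [l, p.1] :: pvRuns key p.2 (p.1 + 1)

theorem get_tid_belong_eq_foldE (ii : Int) (data : List String) :
    get_tid_belong ii data =
      ((PySem.List.enumerate data 0).foldl (pvStepA (PySem.Int.toStr ii))
        (-1, -1, 0, ([] : List (List Int)))).2.2.2 := by
  rw [PySem.List.enumerate_eq_map_pyRange (d := ""), List.foldl_map]
  simp only [get_tid_belong, pvStepA, PySem.List.len_eq]

theorem pvMain (key : String) : ∀ (xs : List String),
    (∀ (s l r : Int) (res : List (List Int)),
      ((PySem.List.enumerate xs s).foldl (pvStepA key) (l, r, 0, res)).2.2.2 =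
        res ++ pvRuns key xs s) ∧
    (∀ (r l : Int) (res : List (List Int)),
      ((PySem.List.enumerate xs (r + 1)).foldl (pvStepA key) (l, r, 1, res)).2.2.2 =
        res ++ pvTail key l xs r) := by
  intro xs
  induction xs with
  | nil =>
    constructor
    · intro s l r res; simp [PySem.List.enumerate_nil, pvRuns]
    · intro r l res; simp [PySem.List.enumerate_nil, pvTail, pvConsume]
  | cons line rest ih =>
    constructor
    · intro s l r res
      rw [PySem.List.enumerate_cons]
      by_cases h : key ∈ (PySem.Str.split? line " ").getD []
      · simp only [List.foldl_cons, pvStepA, if_pos h, if_neg (by simp : ¬ ((0 : Int) ≠ 0))]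
        rw [ih.2 s]
        simp [pvRuns, pvMatch, h, pvTail]
      · simp only [List.foldl_cons, pvStepA, if_neg h, if_neg (by simp : ¬ ((0 : Int) ≠ 0))]
        rw [ih.1 (s + 1)]
        simp [pvRuns, pvMatch, h]
    · intro r l res
      rw [PySem.List.enumerate_cons]
      by_cases h : key ∈ (PySem.Str.split? line " ").getD []
      · simp only [List.foldl_cons, pvStepA, if_pos h,
          if_pos (show (1 : Int) ≠ 0 by norm_num)]
        rw [ih.2 (r + 1)]
        simp [pvTail, pvConsume, pvMatch, h]
      · simp only [List.foldl_cons, pvStepA, if_neg h,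
          if_pos (show (1 : Int) ≠ 0 by norm_num)]
        rw [ih.1 (r + 1 + 1)]
        simp [pvTail, pvConsume, pvMatch, h, pvRuns, List.append_assoc]

-- ===== VERDICT (by name: the statement is the Claim_ definition above) =====
theorem get_tid_belong_spec : Claim_equal_get_tid_belong := by
  intro ii data _
  unfold Spec_get_tid_belong get_tid_belong_alt
  rw [get_tid_belong_eq_foldE, (pvMain (PySem.Int.toStr ii) data).1]
  simp
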